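-- pv_equiv track=rewrite | github.com/broadinstitute/conseq | conseq/depquery.py | split_props_by_counts
-- ===== SOURCE A (Python) =====
-- def split_props_by_counts(property_counts):
--     common = []
--     varying = []
--     for property, count in property_counts:
--         if count == 1:
--             common.append(property)
--         else:
--             varying.append(property)
--     common.sort()
--     varying.sort()
--     return common, varying
-- ===== SOURCE B (Python) =====
-- def _insert_sorted(xs, x):
--     """Insert x into the sorted list xs, keeping it sorted (recursive ordered insert)."""
--     if not xs:
--         return [x]
--     if x < xs[0]:
--         return [x] + xs
--     return [xs[0]] + _insert_sorted(xs[1:], x)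
--
--
-- def split_props_by_counts(property_counts):
--     common = []
--     varying = []
--     for prop, count in property_counts:
--         if count == 1:
--             common = _insert_sorted(common, prop)
--         else:
--             varying = _insert_sorted(varying, prop)
--     return common, varying
-- ===== Notes on version B (the rewrite author's own statement) =====
-- stated objective: alternative
-- what changed: B never calls sort: it maintains both result lists sorted at all times, inserting each property into its group's correct position with a recursive ordered-insert helper (online insertion sort) instead of partitioning first and sorting each group afterwards.
import Mathlib
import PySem

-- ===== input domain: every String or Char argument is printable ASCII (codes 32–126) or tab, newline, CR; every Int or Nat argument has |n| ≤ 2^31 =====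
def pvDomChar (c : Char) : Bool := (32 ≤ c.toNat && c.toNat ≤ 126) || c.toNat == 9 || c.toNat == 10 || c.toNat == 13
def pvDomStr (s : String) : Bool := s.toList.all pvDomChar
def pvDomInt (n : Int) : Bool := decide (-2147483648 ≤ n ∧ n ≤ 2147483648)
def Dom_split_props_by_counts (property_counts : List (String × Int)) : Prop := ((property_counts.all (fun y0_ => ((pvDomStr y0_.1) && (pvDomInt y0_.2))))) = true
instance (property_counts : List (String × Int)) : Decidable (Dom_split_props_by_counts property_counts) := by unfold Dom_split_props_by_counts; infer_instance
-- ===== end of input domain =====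

-- B maintains both result lists sorted at all times via a recursive ordered insert (online insertion sort, no sort call); same result, alternative algorithm.


-- ===== PORT A =====
-- A: one pass appending to common/varying, then sort each result list.
def split_props_by_counts (property_counts : List (String × Int)) : List String × List String :=
  let acc := property_counts.foldl
    (fun (acc : List String × List String) pc =>
      if pc.2 == 1 then (acc.1 ++ [pc.1], acc.2) else (acc.1, acc.2 ++ [pc.1]))
    ([], [])
  (PySem.List.sorted acc.1 (fun x => x) false, PySem.List.sorted acc.2 (fun x => x) false)

-- ===== PORT B =====
-- B helper _insert_sorted: insert x into a sorted list, recursively.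
def pvInsertSorted (xs : List String) (x : String) : List String :=
  match xs with
  | [] => [x]
  | y :: rest => if x < y then x :: y :: rest else y :: pvInsertSorted rest x

-- B: one pass; each property is ordered-inserted into its group, which stays sorted throughout.
def split_props_by_counts_alt (property_counts : List (String × Int)) : List String × List String :=
  property_counts.foldl
    (fun (acc : List String × List String) pc =>
      if pc.2 == 1 then (pvInsertSorted acc.1 pc.1, acc.2) else (acc.1, pvInsertSorted acc.2 pc.1))
    ([], [])

-- ===== PRECONDITION & SPEC =====
def Spec_split_props_by_counts (property_counts : List (String × Int)) (out : List String × List String) : Prop := out = split_props_by_counts_alt property_counts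
instance (property_counts : List (String × Int)) (out : List String × List String) : Decidable (Spec_split_props_by_counts property_counts out) := by unfold Spec_split_props_by_counts; infer_instance

-- ===== CLAIM (what is proved, stated in full; the proofs are below) =====
def Claim_equal_split_props_by_counts : Prop := ∀ (property_counts : List (String × Int)), Dom_split_props_by_counts property_counts → Spec_split_props_by_counts property_counts (split_props_by_counts property_counts)

-- ===== LEMMAS AND PROOFS =====

-- A's partition loop computes filter-then-map on each side.
theorem pv_partition_foldl (xs : List (String × Int)) (c v : List String) :
    xs.foldl (fun (acc : List String × List String) pc =>
        if pc.2 == 1 then (acc.1 ++ [pc.1], acc.2) else (acc.1, acc.2 ++ [pc.1])) (c, v)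
    = (c ++ (xs.filter (fun pc => pc.2 == 1)).map (·.1),
       v ++ (xs.filter (fun pc => !(pc.2 == 1))).map (·.1)) := by
  induction xs generalizing c v with
  | nil => simp
  | cons x xs ih =>
    cases hb : (x.2 == 1) with
    | true =>
      simp only [List.foldl_cons, hb, if_true]
      rw [ih]; simp [hb]
    | false =>
      simp only [List.foldl_cons, hb]
      rw [ih]; simp [hb]

-- B's loop decomposes into an ordered-insert fold over each side's filtered projection.
theorem pv_alt_foldl (xs : List (String × Int)) (c v : List String) :
    xs.foldl (fun (acc : List String × List String) pc =>
        if pc.2 == 1 then (pvInsertSorted acc.1 pc.1, acc.2) else (acc.1, pvInsertSorted acc.2 pc.1)) (c, v)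
    = (((xs.filter (fun pc => pc.2 == 1)).map (·.1)).foldl pvInsertSorted c,
       ((xs.filter (fun pc => !(pc.2 == 1))).map (·.1)).foldl pvInsertSorted v) := by
  induction xs generalizing c v with
  | nil => simp
  | cons x xs ih =>
    cases hb : (x.2 == 1) with
    | true =>
      simp only [List.foldl_cons, hb, if_true]
      rw [ih]; simp [hb]
    | false =>
      simp only [List.foldl_cons, hb]
      rw [ih]; simp [hb]

theorem pv_insertSorted_perm (xs : List String) (x : String) :
    (pvInsertSorted xs x).Perm (x :: xs) := by
  induction xs with
  | nil => simp [pvInsertSorted]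
  | cons y rest ih =>
    unfold pvInsertSorted
    split_ifs with h
    · exact List.Perm.refl _
    · exact (List.Perm.cons y ih).trans (List.Perm.swap x y rest)

theorem pv_insertSorted_pairwise (xs : List String) (x : String)
    (h : xs.Pairwise (· ≤ ·)) : (pvInsertSorted xs x).Pairwise (· ≤ ·) := by
  induction xs with
  | nil => simp [pvInsertSorted]
  | cons y rest ih =>
    rw [List.pairwise_cons] at h
    unfold pvInsertSorted
    split_ifs with hlt
    · refine List.Pairwise.cons ?_ (List.Pairwise.cons h.1 h.2)
      intro z hz
      rcases List.mem_cons.mp hz with rfl | hz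
      · exact le_of_lt hlt
      · exact le_of_lt (lt_of_lt_of_le hlt (h.1 z hz))
    · refine List.Pairwise.cons ?_ (ih h.2)
      intro z hz
      have hm := List.mem_cons.mp ((pv_insertSorted_perm rest x).mem_iff.mp hz)
      rcases hm with rfl | hz'
      · exact le_of_not_gt hlt
      · exact h.1 z hz'

theorem pv_foldl_insert_perm (ys : List String) (c : List String) :
    (ys.foldl pvInsertSorted c).Perm (c ++ ys) := by
  induction ys generalizing c with
  | nil => simp
  | cons y ys ih =>
    simp only [List.foldl_cons]
    refine (ih _).trans ?_
    refine (List.Perm.append_right ys (pv_insertSorted_perm c y)).trans ?_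
    exact List.perm_middle.symm.trans (by simp)

theorem pv_foldl_insert_pairwise (ys : List String) (c : List String)
    (h : c.Pairwise (· ≤ ·)) : (ys.foldl pvInsertSorted c).Pairwise (· ≤ ·) := by
  induction ys generalizing c with
  | nil => exact h
  | cons y ys ih => exact ih _ (pv_insertSorted_pairwise c y h)

-- sorting a list = inserting its elements in order into the empty sorted accumulator
theorem pv_sorted_eq_foldl_insert (ys : List String) :
    PySem.List.sorted ys (fun x => x) false = ys.foldl pvInsertSorted [] := by
  apply PySem.List.sorted_id_eq_of_perm_of_pairwise
  · simpa using pv_foldl_insert_perm ys []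
  · exact pv_foldl_insert_pairwise ys [] (by simp)

-- ===== VERDICT (by name: the statement is the Claim_ definition above) =====
theorem split_props_by_counts_spec : Claim_equal_split_props_by_counts := by
  intro xs _hdom
  unfold Spec_split_props_by_counts split_props_by_counts split_props_by_counts_alt
  rw [pv_partition_foldl, pv_alt_foldl]
  simp only [List.nil_append]
  rw [pv_sorted_eq_foldl_insert, pv_sorted_eq_foldl_insert]
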